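-- pv_equiv track=rewrite | github.com/arthurBricq/ImageAnalysisLabs | lab02/jonas/temp_notebook.py | mirrored_periodisation
-- ===== SOURCE A (Python) =====
-- def mirrored_periodisation(idx,N):
--     ''' mirrored periodisation of signal of length N evaluated at index current_idx
--         For a signal s={...0,0,|0|,1,2,3,0,0,...} the result is
--         s_p={...2,1,|0|,1,2,3,2,1,0,1,...}
--         \param N        support of signal, in example above N=4
--         \param idx      index where to evaluate periodic version s_p ot s
--     '''
--     if idx<0:
--         idx=-idx
--     elif idx>=N:
--         #try and write it out if you want to understand...
--         #...it is just a mathematical expression for a mirrored periodic sequence of indices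
--         idx=(int(idx/(N-1))%2)*(N-1-idx%(N-1))+(1-int(idx/(N-1))%2)*(idx%(N-1))
--
--     #recursive correction
--     if idx<0 or idx>=N:
--         idx=mirrored_periodisation(idx,N);
--
--     #retunr equivalent index in bounds [0;N-1]
--     return idx
-- ===== SOURCE B (Python) =====
-- def mirrored_periodisation(idx, N):
--     # mirror-fold idx into [0, N-1] with one modulo by the mirror period 2*(N-1)
--     if 0 <= idx < N:
--         return idx
--     P = 2 * (N - 1)
--     m = idx % P
--     return m if m < N else P - m
-- ===== Notes on version B (the rewrite author's own statement) =====
-- stated objective: simpler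
-- what changed: Replaces A's negate branch, parity-based closed form with float division, and recursive correction pass by a single nonnegative modulo by the mirror period 2*(N-1) followed by one comparison (B never recurses).
import Mathlib
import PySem

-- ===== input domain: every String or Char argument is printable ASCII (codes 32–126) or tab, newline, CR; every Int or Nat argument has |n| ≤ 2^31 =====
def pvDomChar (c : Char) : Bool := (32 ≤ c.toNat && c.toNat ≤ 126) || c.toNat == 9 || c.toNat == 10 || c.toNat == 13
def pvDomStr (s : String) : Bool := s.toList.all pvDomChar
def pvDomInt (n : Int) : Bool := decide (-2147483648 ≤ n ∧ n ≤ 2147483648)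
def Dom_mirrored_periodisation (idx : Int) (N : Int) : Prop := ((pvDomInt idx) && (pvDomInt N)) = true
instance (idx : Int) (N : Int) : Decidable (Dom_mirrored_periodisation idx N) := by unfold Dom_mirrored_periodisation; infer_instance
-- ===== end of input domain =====

-- B replaces A's negate branch, parity closed form and recursive correction by one modulo by the
-- mirror period 2*(N-1) and one comparison (objective: simpler).

-- ===== PORT A =====
-- the elif branch's formula; Python's int(idx/(N-1)) is float truncating division, exact for
-- |idx|,|N| ≤ 2^31 (well below 2^53), so PySem.Int.truncdiv is exact on Dom_
def mpStep (idx N : Int) : Int :=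
  (PySem.Int.mod (PySem.Int.truncdiv idx (N - 1)) 2) * (N - 1 - PySem.Int.mod idx (N - 1))
    + (1 - PySem.Int.mod (PySem.Int.truncdiv idx (N - 1)) 2) * (PySem.Int.mod idx (N - 1))

-- the fuel only makes A's self-recursive correction structurally total; on Pre_ the recursion
-- depth is at most 2, so fuel 4 is never exhausted there
def mpGo : Nat → Int → Int → Int
  | 0, idx, _ => idx
  | fuel + 1, idx, N =>
    let idx1 := if idx < 0 then -idx else if N ≤ idx then mpStep idx N else idx
    if idx1 < 0 ∨ N ≤ idx1 then mpGo fuel idx1 N else idx1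

def mirrored_periodisation (idx : Int) (N : Int) : Int := mpGo 4 idx N

-- ===== PORT B =====
def mirrored_periodisation_alt (idx : Int) (N : Int) : Int :=
  if 0 ≤ idx ∧ idx < N then idx
  else
    let P := 2 * (N - 1)
    let m := PySem.Int.mod idx P
    if m < N then m else P - m

-- ===== PRECONDITION & SPEC =====
-- Pre_ excludes exactly the inputs where A does not return: N = 1 with idx ≠ 0 raises
-- ZeroDivisionError, and N ≤ 0 recurses forever (RecursionError).
def Pre_mirrored_periodisation (idx : Int) (N : Int) : Prop := 2 ≤ N ∨ (N = 1 ∧ idx = 0)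
instance (idx : Int) (N : Int) : Decidable (Pre_mirrored_periodisation idx N) := by
  unfold Pre_mirrored_periodisation; infer_instance

def pvWitness_mirrored_periodisation : Int × Int := (5, 4)

def Spec_mirrored_periodisation (idx : Int) (N : Int) (out : Int) : Prop := out = mirrored_periodisation_alt idx N
instance (idx : Int) (N : Int) (out : Int) : Decidable (Spec_mirrored_periodisation idx N out) := by
  unfold Spec_mirrored_periodisation; infer_instance

-- ===== CLAIM (what is proved, stated in full; the proofs are below) =====
def Claim_equal_mirrored_periodisation : Prop := ∀ (idx : Int) (N : Int), Dom_mirrored_periodisation idx N → Pre_mirrored_periodisation idx N → Spec_mirrored_periodisation idx N (mirrored_periodisation idx N)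

-- ===== LEMMAS AND PROOFS =====

-- A's formula branch, for N ≤ x with 2 ≤ N, equals B's modulo fold (and lands in [0, N))
theorem mpStep_eq_alt {x N : Int} (hN : 2 ≤ N) (hx : N ≤ x) :
    mpStep x N = mirrored_periodisation_alt x N ∧ 0 ≤ mpStep x N ∧ mpStep x N < N := by
  have hK : (0:Int) < N - 1 := by omega
  have htd : PySem.Int.truncdiv x (N - 1) = x / (N - 1) := by
    show Int.tdiv x (N - 1) = x / (N - 1)
    exact Int.tdiv_eq_ediv_of_nonneg (by omega)
  have hmK : PySem.Int.mod x (N - 1) = x % (N - 1) := PySem.Int.mod_eq_emod_of_pos hK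
  have hm2 : ∀ a : Int, PySem.Int.mod a 2 = a % 2 := fun a =>
    PySem.Int.mod_eq_emod_of_pos (by norm_num)
  have hrb : 0 ≤ x % (N - 1) ∧ x % (N - 1) < N - 1 :=
    ⟨Int.emod_nonneg x (by omega), Int.emod_lt_of_pos x hK⟩
  have hqr : (N - 1) * (x / (N - 1)) + x % (N - 1) = x := Int.mul_ediv_add_emod x (N - 1)
  have hq2 : 2 * (x / (N - 1) / 2) + x / (N - 1) % 2 = x / (N - 1) :=
    Int.mul_ediv_add_emod (x / (N - 1)) 2
  have hkey : x % (2 * (N - 1)) = (N - 1) * (x / (N - 1) % 2) + x % (N - 1) := by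
    have h1 : x = (N - 1) * (x / (N - 1) % 2) + x % (N - 1)
        + 2 * (N - 1) * (x / (N - 1) / 2) := by
      have h2 : (N - 1) * (x / (N - 1) % 2) + x % (N - 1) + 2 * (N - 1) * (x / (N - 1) / 2)
          = (N - 1) * (2 * (x / (N - 1) / 2) + x / (N - 1) % 2) + x % (N - 1) := by ring
      rw [h2, hq2, hqr]
    conv_lhs => rw [h1]
    rw [Int.add_mul_emod_self_left]
    rcases Int.emod_two_eq (x / (N - 1)) with h | h <;> rw [h] <;>
      refine Int.emod_eq_of_lt ?_ ?_ <;> omega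
  have halt : mirrored_periodisation_alt x N =
      if x % (2 * (N - 1)) < N then x % (2 * (N - 1)) else 2 * (N - 1) - x % (2 * (N - 1)) := by
    unfold mirrored_periodisation_alt
    rw [if_neg (by omega)]
    show (if PySem.Int.mod x (2 * (N - 1)) < N then PySem.Int.mod x (2 * (N - 1))
        else 2 * (N - 1) - PySem.Int.mod x (2 * (N - 1))) = _
    rw [PySem.Int.mod_eq_emod_of_pos (show (0:Int) < 2 * (N - 1) by omega)]
  have hstep : mpStep x N = (x / (N - 1) % 2) * (N - 1 - x % (N - 1))
      + (1 - x / (N - 1) % 2) * (x % (N - 1)) := by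
    unfold mpStep
    rw [htd, hmK, hm2]
  rw [halt, hstep, hkey]
  rcases Int.emod_two_eq (x / (N - 1)) with h | h <;> rw [h] <;> split_ifs <;>
    constructor <;> try constructor
  all_goals omega

-- B on a small negative index (-idx < N) is the plain reflection -idx
theorem alt_neg_small {idx N : Int} (hN : 2 ≤ N) (h0 : idx < 0) (h1 : -idx < N) :
    mirrored_periodisation_alt idx N = -idx := by
  have hP : (0:Int) < 2 * (N - 1) := by omega
  have hm : PySem.Int.mod idx (2 * (N - 1)) = idx + 2 * (N - 1) := by
    have h2 : (idx + 2 * (N - 1) * 1) % (2 * (N - 1)) = idx % (2 * (N - 1)) :=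
      Int.add_mul_emod_self_left idx (2 * (N - 1)) 1
    rw [PySem.Int.mod_eq_emod_of_pos hP, ← h2, mul_one]
    exact Int.emod_eq_of_lt (by omega) (by omega)
  unfold mirrored_periodisation_alt
  rw [if_neg (by omega)]
  show (if PySem.Int.mod idx (2 * (N - 1)) < N then PySem.Int.mod idx (2 * (N - 1))
      else 2 * (N - 1) - PySem.Int.mod idx (2 * (N - 1))) = -idx
  rw [hm]
  split_ifs <;> omega

-- B is even in idx (for idx < 0 with N ≤ -idx, fold idx to -idx)
theorem alt_neg {idx N : Int} (hN : 2 ≤ N) (h0 : idx < 0) (h1 : N ≤ -idx) :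
    mirrored_periodisation_alt idx N = mirrored_periodisation_alt (-idx) N := by
  have hP : (0:Int) < 2 * (N - 1) := by omega
  have hmb : 0 ≤ idx % (2 * (N - 1)) ∧ idx % (2 * (N - 1)) < 2 * (N - 1) :=
    ⟨Int.emod_nonneg idx (by omega), Int.emod_lt_of_pos idx hP⟩
  have hm2 : (-idx) % (2 * (N - 1)) =
      if idx % (2 * (N - 1)) = 0 then 0 else 2 * (N - 1) - idx % (2 * (N - 1)) := by
    rw [Int.neg_emod]
    by_cases h : (2 * (N - 1)) ∣ idx
    · rw [if_pos h, if_pos (Int.emod_eq_zero_of_dvd h)]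
    · rw [if_neg h, if_neg (fun hz => h (Int.dvd_of_emod_eq_zero hz)),
        Int.natAbs_of_nonneg (show (0:Int) ≤ 2 * (N - 1) by omega)]
  unfold mirrored_periodisation_alt
  rw [if_neg (show ¬(0 ≤ idx ∧ idx < N) by omega),
    if_neg (show ¬(0 ≤ -idx ∧ -idx < N) by omega)]
  show (if PySem.Int.mod idx (2 * (N - 1)) < N then PySem.Int.mod idx (2 * (N - 1))
      else 2 * (N - 1) - PySem.Int.mod idx (2 * (N - 1)))
    = (if PySem.Int.mod (-idx) (2 * (N - 1)) < N then PySem.Int.mod (-idx) (2 * (N - 1))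
      else 2 * (N - 1) - PySem.Int.mod (-idx) (2 * (N - 1)))
  rw [PySem.Int.mod_eq_emod_of_pos hP, PySem.Int.mod_eq_emod_of_pos hP, hm2]
  by_cases hz : idx % (2 * (N - 1)) = 0
  · rw [if_pos hz]; split_ifs <;> omega
  · rw [if_neg hz]; split_ifs <;> omega

-- one unfolding of A's loop body
theorem mpGo_succ (fuel : Nat) (idx N : Int) :
    mpGo (fuel + 1) idx N =
      (let idx1 := if idx < 0 then -idx else if N ≤ idx then mpStep idx N else idx
       if idx1 < 0 ∨ N ≤ idx1 then mpGo fuel idx1 N else idx1) := rfl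

-- A's formula branch resolves with no further recursion
theorem mpGo_of_ge {fuel : Nat} {idx N : Int} (hN : 2 ≤ N) (hx : N ≤ idx) :
    mpGo (fuel + 1) idx N = mirrored_periodisation_alt idx N := by
  obtain ⟨heq, hlo, hhi⟩ := mpStep_eq_alt hN hx
  rw [mpGo_succ]
  simp only [if_neg (show ¬ idx < 0 by omega), if_pos hx]
  rw [if_neg (by omega)]
  exact heq

-- ===== VERDICT (by name: the statement is the Claim_ definition above) =====
theorem mirrored_periodisation_spec : Claim_equal_mirrored_periodisation := by
  intro idx N _hDom hPre
  unfold Spec_mirrored_periodisation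
  rcases hPre with hN | ⟨hN1, hidx⟩
  · by_cases h0 : idx < 0
    · by_cases h1 : -idx < N
      · have : mirrored_periodisation idx N = -idx := by
          unfold mirrored_periodisation
          rw [mpGo_succ]
          simp only [if_pos h0]
          rw [if_neg (by omega)]
        rw [this, alt_neg_small hN h0 h1]
      · have : mirrored_periodisation idx N = mpGo 3 (-idx) N := by
          unfold mirrored_periodisation
          rw [mpGo_succ]
          simp only [if_pos h0]
          rw [if_pos (by omega)]
        rw [this, mpGo_of_ge hN (by omega), alt_neg hN h0 (by omega)]
    · by_cases h2 : N ≤ idx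
      · exact mpGo_of_ge hN h2
      · have : mirrored_periodisation idx N = idx := by
          unfold mirrored_periodisation
          rw [mpGo_succ]
          simp only [if_neg h0, if_neg h2]
          rw [if_neg (by omega)]
        rw [this]
        unfold mirrored_periodisation_alt
        rw [if_pos ⟨by omega, by omega⟩]
  · subst hN1; subst hidx; decide
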